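-- pv_equiv track=rewrite | github.com/FZhg/promptimize | promptimize/utils.py | insert_in_dict
-- ===== SOURCE A (Python) =====
-- from typing import Dict, Any, Union, List
-- from typing import Any, Dict, Optional, Union
--
-- def insert_in_dict(
--     dictionary: Dict[Any, Any],
--     key: Any,
--     value: Any,
--     position: Optional[int] = None,
--     before_key: Optional[Any] = None,
--     after_key: Optional[Any] = None,
-- ) -> Dict[Any, Any]:
--     """
--     Insert a key/value pair in a dictionary at a specific position, before a specified key, or after a specified key.
--
--     Args:
--         dictionary (Dict[Any, Any]): The original dictionary.
--         key (Any): The key to be inserted.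
--         value (Any): The value associated with the key.
--         position (Optional[int], optional): The position at which the key/value pair should be inserted. Defaults to None.
--         before_key (Optional[Any], optional): The key before which the new key/value pair should be inserted. Defaults to None.
--         after_key (Optional[Any], optional): The key after which the new key/value pair should be inserted. Defaults to None.
--
--     Raises:
--         ValueError: If more than one of 'position', 'before_key', or 'after_key' is specified.
--         ValueError: If the specified position is out of range.
--         KeyError: If 'before_key' or 'after_key' is not found in the dictionary.
--
--     Returns:
--         Dict[Any, Any]: A new dictionary with the inserted key/value pair.
--     """
--     if sum([bool(position is not None), bool(before_key), bool(after_key)]) > 1: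
--         raise ValueError(
--             "Only one of 'position', 'before_key', or 'after_key' can be specified"
--         )
--
--     if position is not None and (position > len(dictionary) or position < 0):
--         raise ValueError("Position is out of range")
--
--     if before_key is not None and before_key not in dictionary:
--         raise KeyError(f"'before_key': {before_key} not found in the dictionary")
--
--     if after_key is not None and after_key not in dictionary:
--         raise KeyError(f"'after_key': {after_key} not found in the dictionary")
--
--     new_dict = {}
--     inserted = False
--
--     for index, (dict_key, dict_value) in enumerate(dictionary.items()):
--         if position == index or dict_key == before_key:
--             new_dict[key] = value
--             inserted = True
--         elif after_key == dict_key: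
--             new_dict[dict_key] = dict_value
--             new_dict[key] = value
--             inserted = True
--             continue
--
--         new_dict[dict_key] = dict_value
--
--     if not inserted or position == len(dictionary):
--         new_dict[key] = value
--
--     return new_dict
-- ===== SOURCE B (Python) =====
-- from typing import Any, Dict, Optional
--
--
-- def insert_in_dict(
--     dictionary: Dict[Any, Any],
--     key: Any,
--     value: Any,
--     position: Optional[int] = None,
--     before_key: Optional[Any] = None,
--     after_key: Optional[Any] = None,
-- ) -> Dict[Any, Any]:
--     """Insert key/value at a position, before a key, or after a key (new dict)."""
--     if sum([bool(position is not None), bool(before_key), bool(after_key)]) > 1: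
--         raise ValueError(
--             "Only one of 'position', 'before_key', or 'after_key' can be specified"
--         )
--     if position is not None and (position > len(dictionary) or position < 0):
--         raise ValueError("Position is out of range")
--     if before_key is not None and before_key not in dictionary:
--         raise KeyError(f"'before_key': {before_key} not found in the dictionary")
--     if after_key is not None and after_key not in dictionary:
--         raise KeyError(f"'after_key': {after_key} not found in the dictionary")
--
--     items = list(dictionary.items())
--     idx = len(items)
--     for index, (dict_key, _) in enumerate(items):
--         if position == index or dict_key == before_key:
--             idx = index
--             break
--         if after_key == dict_key:
--             idx = index + 1
--             break
--     return dict(items[:idx] + [(key, value)] + items[idx:])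
-- ===== Notes on version B (the rewrite author's own statement) =====
-- stated objective: simpler
-- what changed: Replaces A's flag-driven rebuild loop (which re-inserts the key inside three branches and again after the loop) by a single scan that computes the insertion index and one dict(items[:idx] + [(key, value)] + items[idx:]) construction.
-- outside the precondition, e.g. on insert_in_dict({'': 0, 'k': 5}, 'k', 9, 2, '', None): A returns {'k': 9, '': 0}, B returns {'k': 5, '': 0}
import Mathlib
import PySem

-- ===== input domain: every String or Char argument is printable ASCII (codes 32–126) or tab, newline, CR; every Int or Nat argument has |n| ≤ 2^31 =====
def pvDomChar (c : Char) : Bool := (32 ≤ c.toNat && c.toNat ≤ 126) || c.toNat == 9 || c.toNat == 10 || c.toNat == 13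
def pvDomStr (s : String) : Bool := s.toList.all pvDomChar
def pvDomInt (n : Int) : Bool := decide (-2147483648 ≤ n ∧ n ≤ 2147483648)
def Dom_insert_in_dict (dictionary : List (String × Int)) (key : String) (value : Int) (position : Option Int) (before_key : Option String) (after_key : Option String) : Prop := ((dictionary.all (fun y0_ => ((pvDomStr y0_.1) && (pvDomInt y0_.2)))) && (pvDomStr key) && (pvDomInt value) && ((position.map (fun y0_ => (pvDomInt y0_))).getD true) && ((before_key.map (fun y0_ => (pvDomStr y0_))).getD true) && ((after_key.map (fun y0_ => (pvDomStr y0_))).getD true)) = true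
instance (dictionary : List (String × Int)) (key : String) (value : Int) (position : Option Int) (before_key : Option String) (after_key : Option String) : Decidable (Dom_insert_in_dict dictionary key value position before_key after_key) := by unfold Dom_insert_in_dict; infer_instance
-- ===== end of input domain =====

-- ===== PORT A =====
-- B rewrite: one scan finds the insertion index, then a single slice-concat dict build;
-- objective: simpler (same O(n) cost). Both programs return a fresh dict; no argument is mutated.

-- A's loop over enumerate(dictionary.items()); state = (new_dict, inserted), i is the running index.
def pvLoopA (key : String) (value : Int) (position : Option Int) (before_key after_key : Option String) : Nat → PySem.Dict String Int → Bool → List (String × Int) → PySem.Dict String Int × Bool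
  | _, nd, inserted, [] => (nd, inserted)
  | i, nd, inserted, (dk, dv) :: rest =>
      if position == some (i : Int) || some dk == before_key then
        pvLoopA key value position before_key after_key (i + 1) ((nd.insert key value).insert dk dv) true rest
      else if after_key == some dk then
        pvLoopA key value position before_key after_key (i + 1) ((nd.insert dk dv).insert key value) true rest
      else
        pvLoopA key value position before_key after_key (i + 1) (nd.insert dk dv) inserted rest

-- A's three ValueError/KeyError raises are excluded by Pre_insert_in_dict below; the port is the returning path.
def insert_in_dict (dictionary : List (String × Int)) (key : String) (value : Int) (position : Option Int) (before_key : Option String) (after_key : Option String) : List (String × Int) :=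
  let r := pvLoopA key value position before_key after_key 0 PySem.Dict.empty false dictionary
  (if !r.2 || position == some (dictionary.length : Int) then r.1.insert key value else r.1).items

-- ===== PORT B =====
-- B's scan for the insertion index idx (same branch order as Source B's loop; i+len at the end = the idx=len default).
def pvScanB (position : Option Int) (before_key after_key : Option String) : Nat → List (String × Int) → Nat
  | i, [] => i
  | i, (dk, _) :: rest =>
      if position == some (i : Int) || some dk == before_key then i
      else if after_key == some dk then i + 1
      else pvScanB position before_key after_key (i + 1) rest

def insert_in_dict_alt (dictionary : List (String × Int)) (key : String) (value : Int) (position : Option Int) (before_key : Option String) (after_key : Option String) : List (String × Int) :=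
  let idx := pvScanB position before_key after_key 0 dictionary
  (PySem.Dict.ofList (dictionary.take idx ++ [(key, value)] ++ dictionary.drop idx)).items

-- ===== PRECONDITION & SPEC =====
-- Pre_ excludes (a) A's raises: more than one truthy selector (ValueError), position out of range
-- (ValueError), before_key/after_key missing (KeyError); (b) inputs where TWO selectors are given but one is
-- the empty string, which slips past A's truthiness validation — there A's double insertion order is an
-- accidental artefact of re-processing the key, and neither A's nor B's order is specified; (c) lists with
-- duplicate keys, which do not encode any Python dict (the argument is a dict, so its keys are distinct).
def Pre_insert_in_dict (dictionary : List (String × Int)) (key : String) (value : Int) (position : Option Int) (before_key : Option String) (after_key : Option String) : Prop :=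
  (dictionary.map Prod.fst).Nodup ∧
  ((if position.isSome then 1 else 0) + (if before_key.isSome then 1 else 0) + (if after_key.isSome then 1 else 0) : Nat) ≤ 1 ∧
  (∀ p ∈ position, 0 ≤ p ∧ p ≤ dictionary.length) ∧
  (∀ b ∈ before_key, b ∈ dictionary.map Prod.fst) ∧
  (∀ a ∈ after_key, a ∈ dictionary.map Prod.fst)
instance (dictionary : List (String × Int)) (key : String) (value : Int) (position : Option Int) (before_key : Option String) (after_key : Option String) : Decidable (Pre_insert_in_dict dictionary key value position before_key after_key) := by unfold Pre_insert_in_dict; infer_instance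

def pvWitness_insert_in_dict : (List (String × Int)) × String × Int × Option Int × Option String × Option String :=
  ([("a", 1), ("b", 2)], "c", 3, some 1, none, none)

def Spec_insert_in_dict (dictionary : List (String × Int)) (key : String) (value : Int) (position : Option Int) (before_key : Option String) (after_key : Option String) (out : List (String × Int)) : Prop := out = insert_in_dict_alt dictionary key value position before_key after_key
instance (dictionary : List (String × Int)) (key : String) (value : Int) (position : Option Int) (before_key : Option String) (after_key : Option String) (out : List (String × Int)) : Decidable (Spec_insert_in_dict dictionary key value position before_key after_key out) := by unfold Spec_insert_in_dict; infer_instance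

-- ===== CLAIM (what is proved, stated in full; the proofs are below) =====
def Claim_equal_insert_in_dict : Prop := ∀ (dictionary : List (String × Int)) (key : String) (value : Int) (position : Option Int) (before_key : Option String) (after_key : Option String), Dom_insert_in_dict dictionary key value position before_key after_key → Pre_insert_in_dict dictionary key value position before_key after_key → Spec_insert_in_dict dictionary key value position before_key after_key (insert_in_dict dictionary key value position before_key after_key)

-- ===== LEMMAS AND PROOFS =====

-- the fold both results reduce to: building a dict by inserting pairs in order
def pvIns (nd : PySem.Dict String Int) (l : List (String × Int)) : PySem.Dict String Int :=
  l.foldl (fun d q => d.insert q.1 q.2) nd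

lemma pvLoopA_nomatch (key : String) (value : Int) (position : Option Int) (before_key after_key : Option String) :
    ∀ (l : List (String × Int)) (i : Nat) (nd : PySem.Dict String Int) (ins : Bool),
      (∀ (k : Nat) (hk : k < l.length),
        ((position == some ((i + k : Nat) : Int) || some (l[k].1) == before_key) = false) ∧
        ((after_key == some (l[k].1)) = false)) →
      pvLoopA key value position before_key after_key i nd ins l = (pvIns nd l, ins) := by
  intro l
  induction l with
  | nil => intro i nd ins _; rfl
  | cons x rest ih =>
    intro i nd ins H
    obtain ⟨h1, h2⟩ := H 0 (by simp)
    simp only [List.getElem_cons_zero, Nat.add_zero] at h1 h2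
    obtain ⟨dk, dv⟩ := x
    simp only [pvLoopA, h1, h2, Bool.false_eq_true, if_false]
    rw [ih (i + 1) (nd.insert dk dv) ins]
    · rfl
    · intro k hk
      have := H (k + 1) (by simpa using Nat.succ_lt_succ hk)
      simpa [Nat.add_assoc, Nat.add_comm 1 k] using this

lemma pvScanB_nomatch (position : Option Int) (before_key after_key : Option String) :
    ∀ (l : List (String × Int)) (i : Nat),
      (∀ (k : Nat) (hk : k < l.length),
        ((position == some ((i + k : Nat) : Int) || some (l[k].1) == before_key) = false) ∧
        ((after_key == some (l[k].1)) = false)) →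
      pvScanB position before_key after_key i l = i + l.length := by
  intro l
  induction l with
  | nil => intro i _; simp [pvScanB]
  | cons x rest ih =>
    intro i H
    obtain ⟨h1, h2⟩ := H 0 (by simp)
    simp only [List.getElem_cons_zero, Nat.add_zero] at h1 h2
    obtain ⟨dk, dv⟩ := x
    simp only [pvScanB, h1, h2, Bool.false_eq_true, if_false]
    rw [ih (i + 1)]
    · simp; omega
    · intro k hk
      have := H (k + 1) (by simpa using Nat.succ_lt_succ hk)
      simpa [Nat.add_assoc, Nat.add_comm 1 k] using this

lemma pvLoopA_append (key : String) (value : Int) (position : Option Int) (before_key after_key : Option String) :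
    ∀ (l1 l2 : List (String × Int)) (i : Nat) (nd : PySem.Dict String Int) (ins : Bool),
      pvLoopA key value position before_key after_key i nd ins (l1 ++ l2) =
        pvLoopA key value position before_key after_key (i + l1.length)
          (pvLoopA key value position before_key after_key i nd ins l1).1
          (pvLoopA key value position before_key after_key i nd ins l1).2 l2 := by
  intro l1
  induction l1 with
  | nil => intro l2 i nd ins; rfl
  | cons x rest ih =>
    intro l2 i nd ins
    obtain ⟨dk, dv⟩ := x
    simp only [List.cons_append, pvLoopA]
    split
    · rw [ih]; simp [Nat.add_assoc, Nat.add_comm 1 rest.length]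
    · split
      · rw [ih]; simp [Nat.add_assoc, Nat.add_comm 1 rest.length]
      · rw [ih]; simp [Nat.add_assoc, Nat.add_comm 1 rest.length]

lemma pvScanB_append_nomatch (position : Option Int) (before_key after_key : Option String) :
    ∀ (l1 l2 : List (String × Int)) (i : Nat),
      (∀ (k : Nat) (hk : k < l1.length),
        ((position == some ((i + k : Nat) : Int) || some (l1[k].1) == before_key) = false) ∧
        ((after_key == some (l1[k].1)) = false)) →
      pvScanB position before_key after_key i (l1 ++ l2) =
        pvScanB position before_key after_key (i + l1.length) l2 := by
  intro l1
  induction l1 with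
  | nil => intro l2 i _; rfl
  | cons x rest ih =>
    intro l2 i H
    obtain ⟨h1, h2⟩ := H 0 (by simp)
    simp only [List.getElem_cons_zero, Nat.add_zero] at h1 h2
    obtain ⟨dk, dv⟩ := x
    simp only [List.cons_append, pvScanB, h1, h2, Bool.false_eq_true, if_false]
    rw [ih]
    · simp [Nat.add_assoc, Nat.add_comm 1 rest.length]
    · intro k hk
      have := H (k + 1) (by simpa using Nat.succ_lt_succ hk)
      simpa [Nat.add_assoc, Nat.add_comm 1 k] using this

-- B's result as a fold of the same insertion sequence
lemma alt_eq_fold (dictionary : List (String × Int)) (key : String) (value : Int) (position : Option Int) (before_key : Option String) (after_key : Option String) :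
    insert_in_dict_alt dictionary key value position before_key after_key =
      (pvIns PySem.Dict.empty
        (dictionary.take (pvScanB position before_key after_key 0 dictionary) ++ [(key, value)] ++
         dictionary.drop (pvScanB position before_key after_key 0 dictionary))).items := rfl

lemma eq_of_nomatch (d : List (String × Int)) (key : String) (value : Int) (pos : Option Int) (bk ak : Option String)
    (H : ∀ (k : Nat) (hk : k < d.length),
      ((pos == some ((k : Nat) : Int) || some (d[k].1) == bk) = false) ∧ ((ak == some (d[k].1)) = false)) :
    insert_in_dict d key value pos bk ak = insert_in_dict_alt d key value pos bk ak := by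
  have hl : pvLoopA key value pos bk ak 0 PySem.Dict.empty false d = (pvIns PySem.Dict.empty d, false) :=
    pvLoopA_nomatch key value pos bk ak d 0 _ false (by intro k hk; simpa using H k hk)
  have hs : pvScanB pos bk ak 0 d = d.length := by
    simpa using pvScanB_nomatch pos bk ak d 0 (by intro k hk; simpa using H k hk)
  rw [alt_eq_fold]
  simp only [insert_in_dict, hl, hs]
  simp [pvIns, List.foldl_append]

lemma eq_of_match_c1 (d : List (String × Int)) (key : String) (value : Int) (pos : Option Int) (bk ak : Option String)
    (pn : Nat) (hlt : pn < d.length)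
    (Hpre : ∀ (k : Nat), k < pn → (hk : k < d.length) →
      ((pos == some ((k : Nat) : Int) || some (d[k].1) == bk) = false) ∧ ((ak == some (d[k].1)) = false))
    (Hhit : (pos == some ((pn : Nat) : Int) || some (d[pn].1) == bk) = true)
    (Hsuf : ∀ (k : Nat), pn < k → (hk : k < d.length) →
      ((pos == some ((k : Nat) : Int) || some (d[k].1) == bk) = false) ∧ ((ak == some (d[k].1)) = false))
    (Hfin : (pos == some ((d.length : Nat) : Int)) = false) :
    insert_in_dict d key value pos bk ak = insert_in_dict_alt d key value pos bk ak := by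
  have hl1len : (d.take pn).length = pn := by simp; omega
  have hsplit : d = d.take pn ++ d[pn] :: d.drop (pn + 1) := by
    conv_lhs => rw [← List.take_append_drop pn d]
    rw [List.drop_eq_getElem_cons hlt]
  have Hpre' : ∀ (k : Nat) (hk : k < (d.take pn).length),
      ((pos == some (((0 + k : Nat) : Nat) : Int) || some ((d.take pn)[k].1) == bk) = false) ∧
      ((ak == some ((d.take pn)[k].1)) = false) := by
    intro k hk
    have hk' : k < pn := by rwa [hl1len] at hk
    have hg : (d.take pn)[k] = d[k]'(lt_trans hk' hlt) := List.getElem_take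
    rw [hg]
    simpa using Hpre k hk' (lt_trans hk' hlt)
  have Hsuf' : ∀ (k : Nat) (hk : k < (d.drop (pn + 1)).length),
      ((pos == some (((pn + 1 + k : Nat) : Nat) : Int) || some ((d.drop (pn + 1))[k].1) == bk) = false) ∧
      ((ak == some ((d.drop (pn + 1))[k].1)) = false) := by
    intro k hk
    have hk' : pn + 1 + k < d.length := by simp at hk; omega
    have hg : (d.drop (pn + 1))[k] = d[pn + 1 + k]'hk' := List.getElem_drop
    rw [hg]
    exact Hsuf (pn + 1 + k) (by omega) hk'
  rcases hx : d[pn] with ⟨dk, dv⟩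
  have Hhit' : (pos == some ((pn : Nat) : Int) || some dk == bk) = true := by
    have h := Hhit; rw [hx] at h; exact h
  have hloop : pvLoopA key value pos bk ak 0 PySem.Dict.empty false d =
      (pvIns PySem.Dict.empty (d.take pn ++ (key, value) :: (dk, dv) :: d.drop (pn + 1)), true) := by
    conv_lhs => rw [hsplit, hx]
    rw [pvLoopA_append]
    rw [pvLoopA_nomatch key value pos bk ak (d.take pn) 0 _ false Hpre']
    simp only [hl1len, Nat.zero_add, pvLoopA, Hhit', if_true]
    rw [pvLoopA_nomatch key value pos bk ak (d.drop (pn + 1)) (pn + 1) _ true Hsuf']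
    simp [pvIns, List.foldl_append]
  have hscan : pvScanB pos bk ak 0 d = pn := by
    conv_lhs => rw [hsplit, hx]
    rw [pvScanB_append_nomatch pos bk ak (d.take pn) _ 0 Hpre']
    simp only [hl1len, Nat.zero_add, pvScanB, Hhit', if_true]
  rw [alt_eq_fold]
  simp only [insert_in_dict, hloop, hscan, Bool.not_true, Bool.false_or, Hfin]
  congr 1
  rw [List.drop_eq_getElem_cons hlt, hx]
  simp

lemma eq_of_match_c2 (d : List (String × Int)) (key : String) (value : Int) (pos : Option Int) (bk ak : Option String)
    (pn : Nat) (hlt : pn < d.length)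
    (Hpre : ∀ (k : Nat), k < pn → (hk : k < d.length) →
      ((pos == some ((k : Nat) : Int) || some (d[k].1) == bk) = false) ∧ ((ak == some (d[k].1)) = false))
    (Hhit1 : (pos == some ((pn : Nat) : Int) || some (d[pn].1) == bk) = false)
    (Hhit2 : (ak == some (d[pn].1)) = true)
    (Hsuf : ∀ (k : Nat), pn < k → (hk : k < d.length) →
      ((pos == some ((k : Nat) : Int) || some (d[k].1) == bk) = false) ∧ ((ak == some (d[k].1)) = false))
    (Hfin : (pos == some ((d.length : Nat) : Int)) = false) :
    insert_in_dict d key value pos bk ak = insert_in_dict_alt d key value pos bk ak := by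
  have hl1len : (d.take pn).length = pn := by simp; omega
  have hsplit : d = d.take pn ++ d[pn] :: d.drop (pn + 1) := by
    conv_lhs => rw [← List.take_append_drop pn d]
    rw [List.drop_eq_getElem_cons hlt]
  have Hpre' : ∀ (k : Nat) (hk : k < (d.take pn).length),
      ((pos == some (((0 + k : Nat) : Nat) : Int) || some ((d.take pn)[k].1) == bk) = false) ∧
      ((ak == some ((d.take pn)[k].1)) = false) := by
    intro k hk
    have hk' : k < pn := by rwa [hl1len] at hk
    have hg : (d.take pn)[k] = d[k]'(lt_trans hk' hlt) := List.getElem_take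
    rw [hg]
    simpa using Hpre k hk' (lt_trans hk' hlt)
  have Hsuf' : ∀ (k : Nat) (hk : k < (d.drop (pn + 1)).length),
      ((pos == some (((pn + 1 + k : Nat) : Nat) : Int) || some ((d.drop (pn + 1))[k].1) == bk) = false) ∧
      ((ak == some ((d.drop (pn + 1))[k].1)) = false) := by
    intro k hk
    have hk' : pn + 1 + k < d.length := by simp at hk; omega
    have hg : (d.drop (pn + 1))[k] = d[pn + 1 + k]'hk' := List.getElem_drop
    rw [hg]
    exact Hsuf (pn + 1 + k) (by omega) hk'
  rcases hx : d[pn] with ⟨dk, dv⟩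
  have Hhit1' : (pos == some ((pn : Nat) : Int) || some dk == bk) = false := by
    have h := Hhit1; rw [hx] at h; exact h
  have Hhit2' : (ak == some dk) = true := by
    have h := Hhit2; rw [hx] at h; exact h
  have htake : d.take (pn + 1) = d.take pn ++ [(dk, dv)] := by
    rw [List.take_add_one, List.getElem?_eq_getElem hlt, hx]; rfl
  have hdrop : d.drop pn = (dk, dv) :: d.drop (pn + 1) := by
    rw [List.drop_eq_getElem_cons hlt, hx]
  have hloop : pvLoopA key value pos bk ak 0 PySem.Dict.empty false d =
      (pvIns PySem.Dict.empty (d.take pn ++ (dk, dv) :: (key, value) :: d.drop (pn + 1)), true) := by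
    conv_lhs => rw [hsplit, hx]
    rw [pvLoopA_append]
    rw [pvLoopA_nomatch key value pos bk ak (d.take pn) 0 _ false Hpre']
    simp only [hl1len, Nat.zero_add, pvLoopA, Hhit1', Bool.false_eq_true, if_false, Hhit2', if_true]
    rw [pvLoopA_nomatch key value pos bk ak (d.drop (pn + 1)) (pn + 1) _ true Hsuf']
    simp [pvIns, List.foldl_append]
  have hscan : pvScanB pos bk ak 0 d = pn + 1 := by
    conv_lhs => rw [hsplit, hx]
    rw [pvScanB_append_nomatch pos bk ak (d.take pn) _ 0 Hpre']
    simp only [hl1len, Nat.zero_add, pvScanB, Hhit1', Bool.false_eq_true, if_false, Hhit2', if_true]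
  rw [alt_eq_fold]
  simp only [insert_in_dict, hloop, hscan, Bool.not_true, Bool.false_or, Hfin]
  congr 1
  rw [htake]
  simp

-- ===== VERDICT (by name: the statement is the Claim_ definition above) =====
theorem insert_in_dict_spec : Claim_equal_insert_in_dict := by
  intro d key value pos bk ak _hdom hpre
  obtain ⟨hnd, hsum, hposr, hbkr, hakr⟩ := hpre
  unfold Spec_insert_in_dict
  cases pos with
  | none =>
    cases bk with
    | none =>
      cases ak with
      | none =>
        exact eq_of_nomatch d key value none none none (fun k hk => ⟨rfl, rfl⟩)
      | some a =>
        have ham := hakr a rfl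
        obtain ⟨x, hxmem, hx1⟩ := List.mem_map.mp ham
        have hlt : d.findIdx (fun q => q.1 == a) < d.length :=
          List.findIdx_lt_length.mpr ⟨x, hxmem, by simp [hx1]⟩
        have hhita : d[d.findIdx (fun q => q.1 == a)].1 = a := by
          have h := List.findIdx_getElem (w := hlt)
          exact eq_of_beq h
        apply eq_of_match_c2 d key value none none (some a) _ hlt
        · intro k hklt hk
          refine ⟨rfl, ?_⟩
          rw [Option.some_beq_some, beq_eq_false_iff_ne]
          intro he
          exact ne_of_beq_false (List.not_of_lt_findIdx hklt) he.symm
        · rfl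
        · rw [Option.some_beq_some, hhita, beq_self_eq_true]
        · intro k hkgt hk
          refine ⟨rfl, ?_⟩
          rw [Option.some_beq_some, beq_eq_false_iff_ne]
          intro he
          have hmlen : k < (d.map Prod.fst).length := by simpa using hk
          have hmlen' : d.findIdx (fun q => q.1 == a) < (d.map Prod.fst).length := by simpa using hlt
          have hge : (d.map Prod.fst)[k]'hmlen = (d.map Prod.fst)[d.findIdx (fun q => q.1 == a)]'hmlen' := by
            rw [List.getElem_map, List.getElem_map, hhita, ← he]
          have := (hnd.getElem_inj_iff).mp hge
          omega
        · rfl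
    | some b =>
      cases ak with
      | some a => simp at hsum
      | none =>
        have hbm := hbkr b rfl
        obtain ⟨x, hxmem, hx1⟩ := List.mem_map.mp hbm
        have hlt : d.findIdx (fun q => q.1 == b) < d.length :=
          List.findIdx_lt_length.mpr ⟨x, hxmem, by simp [hx1]⟩
        have hhitb : d[d.findIdx (fun q => q.1 == b)].1 = b := by
          have h := List.findIdx_getElem (w := hlt)
          exact eq_of_beq h
        apply eq_of_match_c1 d key value none (some b) none _ hlt
        · intro k hklt hk
          refine ⟨?_, rfl⟩
          rw [Bool.or_eq_false_iff]
          refine ⟨rfl, ?_⟩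
          rw [Option.some_beq_some, beq_eq_false_iff_ne]
          intro he
          exact ne_of_beq_false (List.not_of_lt_findIdx hklt) he
        · rw [Bool.or_eq_true]
          right
          rw [Option.some_beq_some, hhitb, beq_self_eq_true]
        · intro k hkgt hk
          refine ⟨?_, rfl⟩
          rw [Bool.or_eq_false_iff]
          refine ⟨rfl, ?_⟩
          rw [Option.some_beq_some, beq_eq_false_iff_ne]
          intro he
          have hmlen : k < (d.map Prod.fst).length := by simpa using hk
          have hmlen' : d.findIdx (fun q => q.1 == b) < (d.map Prod.fst).length := by simpa using hlt
          have hge : (d.map Prod.fst)[k]'hmlen = (d.map Prod.fst)[d.findIdx (fun q => q.1 == b)]'hmlen' := by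
            rw [List.getElem_map, List.getElem_map, hhitb, he]
          have := (hnd.getElem_inj_iff).mp hge
          omega
        · rfl
  | some p =>
    cases bk with
    | some b => cases ak <;> simp at hsum
    | none =>
      cases ak with
      | some a => simp at hsum
      | none =>
        obtain ⟨h0, hple⟩ := hposr p rfl
        by_cases hpe : p = (d.length : Int)
        · apply eq_of_nomatch
          intro k hk
          refine ⟨?_, rfl⟩
          rw [Bool.or_eq_false_iff]
          refine ⟨?_, rfl⟩
          rw [Option.some_beq_some, beq_eq_false_iff_ne]
          omega
        · have hlt : p.toNat < d.length := by omega
          apply eq_of_match_c1 d key value (some p) none none p.toNat hlt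
          · intro k hklt hk
            refine ⟨?_, rfl⟩
            rw [Bool.or_eq_false_iff]
            refine ⟨?_, rfl⟩
            rw [Option.some_beq_some, beq_eq_false_iff_ne]
            omega
          · rw [Bool.or_eq_true]
            left
            rw [Option.some_beq_some, beq_iff_eq]
            omega
          · intro k hkgt hk
            refine ⟨?_, rfl⟩
            rw [Bool.or_eq_false_iff]
            refine ⟨?_, rfl⟩
            rw [Option.some_beq_some, beq_eq_false_iff_ne]
            omega
          · rw [Option.some_beq_some, beq_eq_false_iff_ne]
            exact hpe
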